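-- pv_equiv track=rewrite | github.com/ShivanshGhelani/CA-DocumentManagement | backend/buckettagtest.py | format_tags_for_upload
-- ===== SOURCE A (Python) =====
-- def format_tags_for_upload(tags_dict):
--     """Convert tags dictionary to URL-encoded string format for upload"""
--     if not tags_dict:
--         return ""
--
--     tag_pairs = []
--     for key, value in tags_dict.items():
--         # URL encode key and value
--         encoded_key = str(key).replace(' ', '+').replace('&', '%26').replace('=', '%3D')
--         encoded_value = str(value).replace(' ', '+').replace('&', '%26').replace('=', '%3D')
--         tag_pairs.append(f"{encoded_key}={encoded_value}")
--
--     return "&".join(tag_pairs)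
-- ===== SOURCE B (Python) =====
-- # B: a single streaming pass that emits output pieces (separator, encoded chars,
-- # '=') into one buffer with a first-item flag, instead of encoding whole strings
-- # with chained .replace and joining a list of "k=v" pairs.
--
-- def _emit(s, out):
--     for c in s:
--         if c == ' ':
--             out.append('+')
--         elif c == '&':
--             out.append('%26')
--         elif c == '=':
--             out.append('%3D')
--         else:
--             out.append(c)
--
-- def format_tags_for_upload(tags_dict):
--     """Convert tags dictionary to URL-encoded string format for upload"""
--     out = []
--     first = True
--     for key, value in tags_dict.items():
--         if not first:
--             out.append('&')
--         first = False
--         _emit(str(key), out)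
--         out.append('=')
--         _emit(str(value), out)
--     return ''.join(out)
-- ===== Notes on version B (the rewrite author's own statement) =====
-- stated objective: alternative
-- what changed: B streams the whole result character-by-character into one buffer (separator decided by a first-item flag, each char encoded by a case dispatch as it is emitted), instead of A's per-string chained .replace encodings collected into a list of 'k=v' strings and joined; the falsy-input guard disappears because the stream is naturally empty.
import Mathlib
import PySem

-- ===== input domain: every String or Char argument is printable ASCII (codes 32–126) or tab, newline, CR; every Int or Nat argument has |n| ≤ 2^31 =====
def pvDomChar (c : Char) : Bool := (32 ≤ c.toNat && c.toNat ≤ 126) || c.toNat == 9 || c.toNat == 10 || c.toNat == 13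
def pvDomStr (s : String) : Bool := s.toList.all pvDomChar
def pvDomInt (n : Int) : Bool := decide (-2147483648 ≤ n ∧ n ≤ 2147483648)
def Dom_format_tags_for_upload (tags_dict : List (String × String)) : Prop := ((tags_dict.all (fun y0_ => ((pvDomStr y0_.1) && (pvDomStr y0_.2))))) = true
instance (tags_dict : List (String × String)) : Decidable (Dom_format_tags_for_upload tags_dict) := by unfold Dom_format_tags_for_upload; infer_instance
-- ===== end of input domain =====

-- B streams the result character-by-character into one buffer (first-item flag for the
-- '&' separator) instead of A's chained .replace encodings joined from a pair list.

-- ===== PORT A =====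
-- '.replace(' ','+').replace('&','%26').replace('=','%3D')'
def pvEncA (s : String) : String :=
  PySem.Str.replace (PySem.Str.replace (PySem.Str.replace s " " "+") "&" "%26") "=" "%3D"

def format_tags_for_upload (tags_dict : List (String × String)) : String :=
  if tags_dict.isEmpty then "" else
    let tag_pairs := tags_dict.foldl
      (fun acc kv =>
        acc ++ [String.ofList ((pvEncA kv.1).toList ++ ['='] ++ (pvEncA kv.2).toList)]) []
    PySem.Str.join "&" tag_pairs

-- ===== PORT B =====
-- the piece emitted for one character
def pvPiece (c : Char) : List Char :=
  if c = ' ' then ['+']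
  else if c = '&' then ['%', '2', '6']
  else if c = '=' then ['%', '3', 'D']
  else [c]

-- _emit: append each character's piece onto the buffer
def pvEmit (s : List Char) (out : List Char) : List Char :=
  s.foldl (fun out c => out ++ pvPiece c) out

def format_tags_for_upload_alt (tags_dict : List (String × String)) : String :=
  let st := tags_dict.foldl
    (fun (st : List Char × Bool) kv =>
      let out := if st.2 then st.1 else st.1 ++ ['&']
      let out := pvEmit kv.1.toList out
      let out := out ++ ['=']
      let out := pvEmit kv.2.toList out
      (out, false)) ([], true)
  String.ofList st.1

-- ===== PRECONDITION & SPEC =====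
def Spec_format_tags_for_upload (tags_dict : List (String × String)) (out : String) : Prop := out = format_tags_for_upload_alt tags_dict
instance (tags_dict : List (String × String)) (out : String) : Decidable (Spec_format_tags_for_upload tags_dict out) := by unfold Spec_format_tags_for_upload; infer_instance

-- ===== CLAIM =====
def Claim_equal_format_tags_for_upload : Prop := ∀ (tags_dict : List (String × String)), Dom_format_tags_for_upload tags_dict → Spec_format_tags_for_upload tags_dict (format_tags_for_upload tags_dict)

-- ===== LEMMAS AND PROOFS =====

-- emitting is appending the flatMap of pieces
theorem pvEmit_eq (s : List Char) (out : List Char) :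
    pvEmit s out = out ++ s.flatMap pvPiece := by
  induction s generalizing out with
  | nil => simp [pvEmit]
  | cons c t ih =>
      show pvEmit t (out ++ pvPiece c) = _
      rw [ih]
      simp

-- replace with a single-character pattern is a per-character flatMap
theorem replace_go_single (a : Char) (nw : List Char) :
    ∀ (l : List Char) (fuel : Nat) (acc : List Char), l.length ≤ fuel →
      PySem.Chars.replace.go [a] nw fuel l acc =
        acc.reverse ++ l.flatMap (fun c => if c = a then nw else [c]) := by
  intro l
  induction l with
  | nil =>
      intro fuel acc _
      cases fuel with
      | zero => simp [PySem.Chars.replace.go]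
      | succ n => simp [PySem.Chars.replace.go]
  | cons c t ih =>
      intro fuel acc hf
      cases fuel with
      | zero => simp at hf
      | succ n =>
        simp only [PySem.Chars.replace.go]
        by_cases hca : c = a
        · subst hca
          have hpre : List.isPrefixOf [c] (c :: t) = true := by
            simp [List.isPrefixOf]
          simp only [hpre, if_pos]
          rw [show List.drop [c].length (c :: t) = t from rfl]
          rw [ih n (nw.reverse ++ acc) (by simp at hf ⊢; omega)]
          simp [List.flatMap_cons]
        · have hpre : List.isPrefixOf [a] (c :: t) = false := by
            simp [List.isPrefixOf, BEq.beq]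
            intro h; exact absurd h.symm hca
          simp only [hpre]
          rw [ih n (c :: acc) (by simp at hf ⊢; omega)]
          simp [List.flatMap_cons, hca]

theorem replace_single (a : Char) (nw s : List Char) :
    PySem.Chars.replace s [a] nw = s.flatMap (fun c => if c = a then nw else [c]) := by
  have h : ([a] : List Char).isEmpty = false := rfl
  simp only [PySem.Chars.replace, h, Bool.false_eq_true, if_false]
  exact replace_go_single a nw s s.length [] (le_refl _)

-- the three chained replaces collapse to a single pvPiece pass
theorem encA_toList (s : String) : (pvEncA s).toList = s.toList.flatMap pvPiece := by
  unfold pvEncA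
  simp only [PySem.Str.replace, String.toList_ofList]
  show PySem.Chars.replace (PySem.Chars.replace (PySem.Chars.replace s.toList [' '] ['+']) ['&'] ['%','2','6']) ['='] ['%','3','D'] = _
  rw [replace_single, replace_single, replace_single, List.flatMap_assoc, List.flatMap_assoc]
  apply List.flatMap_congr
  intro c _
  by_cases h1 : c = ' '
  · subst h1; decide
  · by_cases h2 : c = '&'
    · subst h2; decide
    · by_cases h3 : c = '='
      · subst h3; decide
      · simp [pvPiece, h1, h2, h3]

-- one pair's full encoding, as a char list
def pvPair (kv : String × String) : List Char :=
  kv.1.toList.flatMap pvPiece ++ ['='] ++ kv.2.toList.flatMap pvPiece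

-- B's fold, once past the first item, appends '&' :: pvPair for each element
theorem alt_fold_false (t : List (String × String)) :
    ∀ (acc : List Char),
      t.foldl
        (fun (st : List Char × Bool) kv =>
          let out := if st.2 then st.1 else st.1 ++ ['&']
          let out := pvEmit kv.1.toList out
          let out := out ++ ['=']
          let out := pvEmit kv.2.toList out
          (out, false)) (acc, false) =
      (acc ++ t.flatMap (fun kv => '&' :: pvPair kv), false) := by
  induction t with
  | nil => intro acc; simp
  | cons x t ih =>
      intro acc
      simp only [List.foldl_cons, List.flatMap_cons]
      rw [ih]
      simp [pvEmit_eq, pvPair]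

-- A's foldl-append accumulation of tag_pairs is a map
theorem foldl_append_map {α β : Type} (g : α → β) (l : List α) (acc : List β) :
    l.foldl (fun acc kv => acc ++ [g kv]) acc = acc ++ l.map g := by
  induction l generalizing acc with
  | nil => simp
  | cons x t ih => simp [List.foldl_cons, ih]

-- intercalating a separator over a nonempty list
theorem intercalate_amp {α : Type} (sep : List α) (x : List α) (t : List (List α)) :
    List.intercalate sep (x :: t) = x ++ t.flatMap (fun y => sep ++ y) := by
  induction t generalizing x with
  | nil => simp [List.intercalate]
  | cons y t ih =>
      have hi : List.intersperse sep (x :: y :: t) = x :: sep :: List.intersperse sep (y :: t) := by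
        simp [List.intersperse]
      simp only [List.intercalate] at ih ⊢
      rw [hi]
      simp only [List.flatten_cons, ih y, List.flatMap_cons]
      simp

-- B's port on a nonempty list, in closed form
theorem alt_cons (x : String × String) (t : List (String × String)) :
    format_tags_for_upload_alt (x :: t) =
      String.ofList (pvPair x ++ t.flatMap (fun kv => '&' :: pvPair kv)) := by
  unfold format_tags_for_upload_alt
  simp only [List.foldl_cons]
  rw [show (pvEmit x.2.toList (pvEmit x.1.toList (if True then [] else [] ++ ['&']) ++ ['=']), false) = ((pvPair x, false) : List Char × Bool) by
    simp [pvEmit_eq, pvPair]]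
  simp only [alt_fold_false]

-- ===== VERDICT =====
theorem format_tags_for_upload_spec : Claim_equal_format_tags_for_upload := by
  intro tags_dict _
  unfold Spec_format_tags_for_upload format_tags_for_upload
  cases tags_dict with
  | nil => rfl
  | cons x t =>
      rw [if_neg (by simp), alt_cons]
      simp only [List.foldl_cons, foldl_append_map, List.nil_append]
      show PySem.Str.join "&" _ = _
      simp only [PySem.Str.join, PySem.Chars.join]
      congr 1
      simp only [List.map_cons, List.map_map, List.singleton_append]
      rw [show ("&" : String).toList = ['&'] from rfl]
      have hmap : ∀ kv : String × String,
          (String.toList ∘ fun kv : String × String =>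
            String.ofList ((pvEncA kv.1).toList ++ ['='] ++ (pvEncA kv.2).toList)) kv = pvPair kv := by
        intro kv; simp [encA_toList, pvPair]
      rw [String.toList_ofList, List.map_congr_left (fun kv _ => hmap kv),
        show ((pvEncA x.1).toList ++ ['='] ++ (pvEncA x.2).toList) = pvPair x by
          simp [encA_toList, pvPair],
        intercalate_amp]
      simp [List.flatMap_map]
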